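-- pv_equiv track=rewrite | github.com/christosTsag24/myProjects | 03-ΘΕ-01-ΥΕ-04-source-code.py | get_5_least_frequent_words
-- ===== SOURCE A (Python) =====
-- import operator
--
-- def get_5_least_frequent_words(words):
--     # Δημιουργία λεξικού το οποίο ως key έχει τις λέξεις και ως value το πλήθος των εμφανίσεων τους
--     dict_of_occurrences = {}
--     for item in words:
--         if item in dict_of_occurrences:
--             dict_of_occurrences[item] += 1
--         else:
--             dict_of_occurrences[item] = 1
--
--     # Ταξινόμηση των κλειδιών του λεξικού με βάση το πλήθος των εμφανίσεών τους κατά αύξουσα σειρά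
--     sorted_list = sorted(dict_of_occurrences.items(), key=operator.itemgetter(1))
--     # Επιστρέφει λίστα με tuples, η οποία είναι ταξινομημένη (αύξουσα σειρά) με βάση το
--     # δεύτερο στοιχείο του tuple
--
--     # Κρατάμε τα 5 πρώτα (πιο σπάνια) στοιχεία της λίστας
--     final_list = sorted_list[:5]
--
--     # Δημιουργούμε την τελική κενή λίστα για τις 5 πιο σπάνιες λέξεις
--     least_words = []
--     # Προσπέλαση της λίστας με τις πλειάδες
--     for key, value in final_list:
--         least_words.append(key)
--
--     return least_words
-- ===== SOURCE B (Python) =====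
-- def get_5_least_frequent_words(words):
--     # Count occurrences (insertion order preserved).
--     counts = {}
--     for w in words:
--         counts[w] = counts.get(w, 0) + 1
--     if not counts:
--         return []
--     # Bucket the words by their count and read the buckets out
--     # from the rarest count upward; no sort needed.
--     max_count = max(counts.values())
--     groups = {}
--     for w, c in counts.items():
--         groups.setdefault(c, []).append(w)
--     least_words = []
--     for c in range(1, max_count + 1):
--         least_words.extend(groups.get(c, []))
--     return least_words[:5]
-- ===== Notes on version B (the rewrite author's own statement) =====
-- stated objective: alternative
-- what changed: B replaces A's comparison sort of the count-dict items by bucketing words into a dict keyed by count and reading the buckets out from count 1 up to the maximum count, preserving first-appearance order within equal counts.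
import Mathlib
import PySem

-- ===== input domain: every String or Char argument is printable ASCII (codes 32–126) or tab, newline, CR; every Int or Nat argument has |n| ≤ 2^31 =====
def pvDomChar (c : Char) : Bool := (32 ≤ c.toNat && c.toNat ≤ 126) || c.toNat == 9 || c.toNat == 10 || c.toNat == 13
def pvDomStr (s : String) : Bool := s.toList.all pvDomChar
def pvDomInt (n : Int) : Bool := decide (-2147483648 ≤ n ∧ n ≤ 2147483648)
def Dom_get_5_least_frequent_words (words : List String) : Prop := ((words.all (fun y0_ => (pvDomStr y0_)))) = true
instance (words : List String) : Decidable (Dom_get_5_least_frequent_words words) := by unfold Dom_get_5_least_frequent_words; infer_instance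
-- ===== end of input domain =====

-- B replaces A's sort of the count-dict items by bucketing the words by count and reading the
-- buckets out from the rarest count upward (objective: alternative — no comparison sort).

-- ===== PORT A =====
def get_5_least_frequent_words (words : List String) : List String :=
  -- dict_of_occurrences: counting loop ('if item in d: d[item] += 1 else: d[item] = 1');
  -- 'd[item]' is exact as 'd.getD item 0' because it is read only when 'd.contains item'.
  let dict_of_occurrences : PySem.Dict String Int :=
    words.foldl (fun d item =>
      if d.contains item then d.insert item (d.getD item 0 + 1)
      else d.insert item 1) PySem.Dict.empty
  let sorted_list := PySem.List.sorted dict_of_occurrences.items (fun p => p.2) false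
  let final_list := PySem.List.slice sorted_list none (some 5)
  let least_words := final_list.foldl (fun acc p => acc ++ [p.1]) ([] : List String)
  least_words

-- ===== PORT B =====
def get_5_least_frequent_words_alt (words : List String) : List String :=
  let counts : PySem.Dict String Int :=
    words.foldl (fun d w => d.insert w (d.getD w 0 + 1)) PySem.Dict.empty
  if counts.items = [] then []
  else
    match PySem.List.max? counts.values (fun v => v) with
    | none => []  -- unreachable: counts is nonempty under the guard
    | some max_count =>
      let groups : PySem.Dict Int (List String) :=
        counts.items.foldl (fun g p => g.modify p.2 [] (fun l => l ++ [p.1])) PySem.Dict.empty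
      let least_words := (PySem.List.pyRange 1 (max_count + 1) 1).foldl
        (fun acc c => acc ++ groups.getD c []) ([] : List String)
      PySem.List.slice least_words none (some 5)

-- ===== PRECONDITION & SPEC =====
def Spec_get_5_least_frequent_words (words : List String) (out : List String) : Prop := out = get_5_least_frequent_words_alt words
instance (words : List String) (out : List String) : Decidable (Spec_get_5_least_frequent_words words out) := by unfold Spec_get_5_least_frequent_words; infer_instance

-- ===== CLAIM (what is proved, stated in full; the proofs are below) =====
def Claim_equal_get_5_least_frequent_words : Prop := ∀ (words : List String), Dom_get_5_least_frequent_words words → Spec_get_5_least_frequent_words words (get_5_least_frequent_words words)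

-- ===== LEMMAS AND PROOFS =====

theorem pv_insertBy_cons {α : Type} (before : α → α → Bool) (x y : α) (ys : List α) :
    PySem.List.insertBy before x (y :: ys)
      = if before x y then x :: y :: ys else y :: PySem.List.insertBy before x ys := rfl

theorem pv_insertBy_append_left {α : Type} (before : α → α → Bool) (x : α) (l t : List α)
    (h : ∀ y ∈ l, before x y = false) :
    PySem.List.insertBy before x (l ++ t) = l ++ PySem.List.insertBy before x t := by
  induction l with
  | nil => simp
  | cons y ys ih =>
    simp only [List.cons_append, pv_insertBy_cons, h y (List.mem_cons_self), Bool.false_eq_true,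
      if_false]
    rw [ih (fun z hz => h z (List.mem_cons_of_mem _ hz))]

theorem pv_insertBy_all_true {α : Type} (before : α → α → Bool) (x : α) (l : List α)
    (h : ∀ y ∈ l, before x y = true) :
    PySem.List.insertBy before x l = x :: l := by
  cases l with
  | nil => rfl
  | cons y ys => rw [pv_insertBy_cons, if_pos (h y (List.mem_cons_self))]

theorem pv_sorted_snd_eq_buckets (m : Int) (xs : List (String × Int))
    (h : ∀ p ∈ xs, 1 ≤ p.2 ∧ p.2 ≤ m) :
    PySem.List.sorted xs (fun p => p.2) false
      = (PySem.List.pyRange 1 (m+1) 1).flatMap (fun c => xs.filter (fun p => p.2 == c)) := by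
  induction xs using List.reverseRecOn with
  | nil => simp [PySem.List.sorted]
  | append_singleton xs x ih =>
    obtain ⟨h1, h2⟩ := h x (by simp)
    have hxs : ∀ p ∈ xs, 1 ≤ p.2 ∧ p.2 ≤ m := fun p hp => h p (by simp [hp])
    have hstep : PySem.List.sorted (xs ++ [x]) (fun p => p.2) false
        = PySem.List.insertBy (fun a b => decide (a.2 < b.2)) x
            (PySem.List.sorted xs (fun p => p.2) false) := by
      rw [PySem.List.sorted_eq_foldl_insertBy, PySem.List.sorted_eq_foldl_insertBy,
        List.foldl_append, List.foldl_cons, List.foldl_nil]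
    rw [hstep, ih hxs]
    have hsplit : PySem.List.pyRange 1 (m+1) 1
        = PySem.List.pyRange 1 (x.2+1) 1 ++ PySem.List.pyRange (x.2+1) (m+1) 1 :=
      PySem.List.pyRange_one_append 1 (x.2+1) (m+1) (by omega) (by omega)
    rw [hsplit, List.flatMap_append, List.flatMap_append]
    rw [pv_insertBy_append_left _ _ _ _ (by
      intro y hy
      simp only [List.mem_flatMap, List.mem_filter] at hy
      obtain ⟨c, hc, hy, hyc⟩ := hy
      rw [PySem.List.mem_pyRange_one] at hc
      simp only [beq_iff_eq] at hyc
      simp only [decide_eq_false_iff_not, not_lt]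
      omega)]
    rw [pv_insertBy_all_true _ _ _ (by
      intro y hy
      simp only [List.mem_flatMap, List.mem_filter] at hy
      obtain ⟨c, hc, hy, hyc⟩ := hy
      rw [PySem.List.mem_pyRange_one] at hc
      simp only [beq_iff_eq] at hyc
      simp only [decide_eq_true_eq]
      omega)]
    -- high buckets unchanged by appending x
    have hhi : (PySem.List.pyRange (x.2+1) (m+1) 1).flatMap
          (fun c => (xs ++ [x]).filter (fun p => p.2 == c))
        = (PySem.List.pyRange (x.2+1) (m+1) 1).flatMap
          (fun c => xs.filter (fun p => p.2 == c)) := by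
      rw [List.flatMap_def, List.flatMap_def]
      congr 1
      apply List.map_congr_left
      intro c hc
      rw [PySem.List.mem_pyRange_one] at hc
      rw [List.filter_append]
      simp only [List.filter_cons, List.filter_nil]
      have : (x.2 == c) = false := by simp; omega
      simp [this]
    rw [hhi]
    -- low buckets: only the bucket at x.2 gains x, at its end
    have hlosplit : PySem.List.pyRange 1 (x.2+1) 1
        = PySem.List.pyRange 1 x.2 1 ++ [x.2] := by
      rw [PySem.List.pyRange_one_append 1 x.2 (x.2+1) (by omega) (by omega),
        PySem.List.pyRange_one_singleton]
    have hlo : (PySem.List.pyRange 1 x.2 1).flatMap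
          (fun c => (xs ++ [x]).filter (fun p => p.2 == c))
        = (PySem.List.pyRange 1 x.2 1).flatMap
          (fun c => xs.filter (fun p => p.2 == c)) := by
      rw [List.flatMap_def, List.flatMap_def]
      congr 1
      apply List.map_congr_left
      intro c hc
      rw [PySem.List.mem_pyRange_one] at hc
      rw [List.filter_append]
      simp only [List.filter_cons, List.filter_nil]
      have : (x.2 == c) = false := by simp; omega
      simp [this]
    rw [hlosplit, List.flatMap_append, List.flatMap_append, hlo]
    have hself : ([x.2] : List Int).flatMap (fun c => (xs ++ [x]).filter (fun p => p.2 == c))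
        = ([x.2] : List Int).flatMap (fun c => xs.filter (fun p => p.2 == c)) ++ [x] := by
      simp [List.filter_append]
    rw [hself]
    simp

theorem pv_countA_eq (words : List String) :
    words.foldl (fun d item =>
      if d.contains item then d.insert item (d.getD item 0 + 1)
      else d.insert item 1) PySem.Dict.empty = PySem.Dict.counter words := by
  rw [← PySem.Dict.foldl_insert_getD_add_one_eq_counter]
  apply PySem.List.foldl_congr_mem
  intro d x _
  cases hc : d.contains x with
  | true => simp
  | false =>
    rw [PySem.Dict.getD_of_not_contains d 0 hc]
    norm_num

theorem pv_groups_getD (items : List (String × Int)) (c : Int) :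
    (items.foldl (fun g p => g.modify p.2 [] (fun l => l ++ [p.1]))
        (PySem.Dict.empty : PySem.Dict Int (List String))).getD c []
      = (items.filter (fun p => p.2 == c)).map (·.1) := by
  have : items.foldl (fun g p => g.modify p.2 [] (fun l => l ++ [p.1]))
        (PySem.Dict.empty : PySem.Dict Int (List String))
      = (items.map Prod.swap).foldl (fun g q => g.modify q.1 [] (fun l => l ++ [q.2]))
        PySem.Dict.empty := by
    rw [List.foldl_map]
    rfl
  rw [this, PySem.Dict.getD_foldl_modify_append]
  simp [List.filter_map, List.map_map, Function.comp_def, Prod.swap]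


-- ===== VERDICT (by name: the statement is the Claim_ definition above) =====
theorem get_5_least_frequent_words_spec : Claim_equal_get_5_least_frequent_words := by
  intro words _
  unfold Spec_get_5_least_frequent_words
  unfold get_5_least_frequent_words get_5_least_frequent_words_alt

  simp only [pv_countA_eq, PySem.Dict.foldl_insert_getD_add_one_eq_counter]
  by_cases hw : words = []
  · subst hw; rfl
  · -- the counter is nonempty
    have hmemw : ∃ w, w ∈ words := by cases words with | nil => simp at hw | cons a l => exact ⟨a, by simp⟩
    obtain ⟨w, hwmem⟩ := hmemw
    have hitems : (PySem.Dict.counter words).items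
        = (PySem.Set.ofList words).map (fun k => (k, (words.count k : Int))) :=
      PySem.Dict.items_counter words
    have hne : (PySem.Dict.counter words).items ≠ [] := by
      rw [hitems]
      simp only [ne_eq, List.map_eq_nil_iff]
      intro hcon
      have := (PySem.Set.mem_ofList words w).mpr hwmem
      rw [hcon] at this; simp at this
    rw [if_neg hne]
    have hvals : (PySem.Dict.counter words).values
        = (PySem.Dict.counter words).items.map (·.2) := rfl
    have hvne : (PySem.Dict.counter words).values ≠ [] := by
      rw [hvals]; simpa using hne
    obtain ⟨m, hm⟩ : ∃ m, PySem.List.max? (PySem.Dict.counter words).values (fun v => v) = some m := by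
      cases h : PySem.List.max? (PySem.Dict.counter words).values (fun v => v) with
      | none => exact absurd ((PySem.List.max?_eq_none_iff _ _).mp h) hvne
      | some m => exact ⟨m, rfl⟩
    rw [hm]
    simp only []
    -- bounds on the counts
    have hbounds : ∀ p ∈ (PySem.Dict.counter words).items, 1 ≤ p.2 ∧ p.2 ≤ m := by
      intro p hp
      constructor
      · rw [hitems] at hp
        simp only [List.mem_map] at hp
        obtain ⟨k, hk, rfl⟩ := hp
        have : k ∈ words := (PySem.Set.mem_ofList words k).mp hk
        have : 0 < words.count k := List.count_pos_iff.mpr this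
        simp only []
        omega
      · exact PySem.List.max?_isMax hm p.2 (by rw [hvals]; exact List.mem_map_of_mem hp)
    -- rewrite both sides to take 5 of a common list
    rw [pv_sorted_snd_eq_buckets m _ hbounds]
    have htake : ∀ (l : List (String × Int)),
        PySem.List.slice l none (some 5) = l.take 5 := by
      intro l; exact_mod_cast PySem.List.slice_to_natCast l 5
    have htake' : ∀ (l : List String),
        PySem.List.slice l none (some 5) = l.take 5 := by
      intro l; exact_mod_cast PySem.List.slice_to_natCast l 5
    rw [htake, htake']
    rw [PySem.List.foldl_append_singleton_eq_map, PySem.List.foldl_append_eq_flatMap]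
    simp only [List.nil_append]
    have hg : ∀ c : Int,
        ((PySem.Dict.counter words).items.foldl (fun g p => g.modify p.2 [] (fun l => l ++ [p.1]))
          (PySem.Dict.empty : PySem.Dict Int (List String))).getD c []
        = ((PySem.Dict.counter words).items.filter (fun p => p.2 == c)).map (·.1) :=
      fun c => pv_groups_getD _ c
    calc (((PySem.List.pyRange 1 (m+1) 1).flatMap
            (fun c => (PySem.Dict.counter words).items.filter (fun p => p.2 == c))).take 5).map (·.1)
        = (((PySem.List.pyRange 1 (m+1) 1).flatMap
            (fun c => (PySem.Dict.counter words).items.filter (fun p => p.2 == c))).map (·.1)).take 5 := by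
          rw [List.map_take]
      _ = ((PySem.List.pyRange 1 (m+1) 1).flatMap
            (fun c => ((PySem.Dict.counter words).items.filter (fun p => p.2 == c)).map (·.1))).take 5 := by
          rw [List.map_flatMap]
      _ = ((PySem.List.pyRange 1 (m+1) 1).flatMap
            (fun c => ((PySem.Dict.counter words).items.foldl
              (fun g p => g.modify p.2 [] (fun l => l ++ [p.1]))
              (PySem.Dict.empty : PySem.Dict Int (List String))).getD c [])).take 5 := by
          simp only [hg]
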